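-- pv_equiv track=rewrite | github.com/wyk18703232953/myResearch | codeComplex/data/onlyCode/python/linear/python_linear_0032.py | process
-- ===== SOURCE A (Python) =====
-- def process(S):
--     n = len(S)
--     h_count = 0
--     answer = float('inf')
--     for c in S:
--         if c=='H':
--             h_count+=1
--     current = 0
--     for i in range(h_count):
--         if S[i]=='H':
--             current+=1
--     answer = min(answer, h_count-current)
--     for i in range(h_count, n+h_count):
--         if i > n-1:
--             i1 = i-n
--         else:
--             i1 = i
--         i2 = i-h_count
--         if S[i1]=='H':
--             current+=1
--         if S[i2]=='H':
--             current-=1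
--         answer = min(answer, h_count-current)
--     return answer
-- ===== SOURCE B (Python) =====
-- def process(S):
--     # Prefix sums of H-counts over the doubled string, then min over all
--     # circular windows of length h_count.
--     n = len(S)
--     p = [0]
--     for c in S + S:
--         p.append(p[-1] + (1 if c == 'H' else 0))
--     h = p[n]
--     best = h - p[h]
--     for i in range(1, n):
--         best = min(best, h - (p[i + h] - p[i]))
--     return best
-- ===== Notes on version B (the rewrite author's own statement) =====
-- stated objective: alternative
-- what changed: Replaces A's stateful sliding-window loop (running counter updated with two modular index reads per step) by a prefix-sum table over the doubled string, so each circular window count is a single subtraction p[i+h]-p[i]; the h-count and the inf seed disappear (h = p[n], seed = window at 0).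
import Mathlib
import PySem

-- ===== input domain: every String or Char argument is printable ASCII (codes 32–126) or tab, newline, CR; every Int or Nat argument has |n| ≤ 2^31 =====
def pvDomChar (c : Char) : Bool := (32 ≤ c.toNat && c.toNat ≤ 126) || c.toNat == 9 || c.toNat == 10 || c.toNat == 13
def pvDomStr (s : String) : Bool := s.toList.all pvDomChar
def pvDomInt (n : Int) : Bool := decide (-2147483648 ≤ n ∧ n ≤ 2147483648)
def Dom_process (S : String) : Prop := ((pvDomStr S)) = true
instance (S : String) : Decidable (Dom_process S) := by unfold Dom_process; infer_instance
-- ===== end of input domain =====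

-- B replaces A's stateful sliding-window counter by a prefix-sum table over the doubled
-- string; same O(n) cost, different structure (objective: alternative).

-- ===== PORT A =====
-- Literal port of A. `answer = float('inf')` followed immediately by
-- `answer = min(answer, h_count - current)` always yields the integer
-- `h_count - current` (min of inf and an int), so `answer` is seeded with that
-- integer here; every later value of `answer` is an int min of ints.
def process (S : String) : Int :=
  let cs := S.toList
  let n : Int := (cs.length : Int)
  let h_count : Int := cs.foldl (fun acc c => if c = 'H' then acc + 1 else acc) 0
  let current : Int := (PySem.List.pyRange 0 h_count 1).foldl
      (fun cur i => if PySem.List.pyGetD cs i ' ' = 'H' then cur + 1 else cur) 0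
  let answer : Int := h_count - current
  let r := (PySem.List.pyRange h_count (n + h_count) 1).foldl
      (fun st i =>
        let i1 : Int := if i > n - 1 then i - n else i
        let i2 : Int := i - h_count
        let c1 : Int := if PySem.List.pyGetD cs i1 ' ' = 'H' then st.1 + 1 else st.1
        let c2 : Int := if PySem.List.pyGetD cs i2 ' ' = 'H' then c1 - 1 else c1
        (c2, min st.2 (h_count - c2))) (current, answer)
  r.2

-- ===== PORT B =====
-- Literal port of Source B: build the prefix-sum list p over S+S by appending
-- p[-1] + (1 if c=='H' else 0), then fold the window minima.
def process_alt (S : String) : Int :=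
  let cs := S.toList
  let n : Int := (cs.length : Int)
  let p : List Int := (cs ++ cs).foldl
      (fun p c => p ++ [PySem.List.pyGetD p (-1) 0 + (if c = 'H' then 1 else 0)]) [0]
  let h : Int := PySem.List.pyGetD p n 0
  let best : Int := h - PySem.List.pyGetD p h 0
  (PySem.List.pyRange 1 n 1).foldl
      (fun best i => min best (h - (PySem.List.pyGetD p (i + h) 0 - PySem.List.pyGetD p i 0)))
      best

-- ===== PRECONDITION & SPEC =====
def Spec_process (S : String) (out : Int) : Prop := out = process_alt S
instance (S : String) (out : Int) : Decidable (Spec_process S out) := by unfold Spec_process; infer_instance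

-- ===== CLAIM (what is proved, stated in full; the proofs are below) =====
def Claim_equal_process : Prop := ∀ (S : String), Dom_process S → Spec_process S (process S)

-- ===== LEMMAS AND PROOFS =====

-- number of 'H' in a list, as an Int
def pvCnt (l : List Char) : Int := (l.count 'H' : Int)

-- H-count of the circular window of length h_count starting at s (read off the doubled list)
def pvW (cs : List Char) (s : Nat) : Int :=
  pvCnt (((cs ++ cs).drop s).take (cs.count 'H'))

-- swaps needed for the window starting at s
def pvF (cs : List Char) (s : Nat) : Int := pvCnt cs - pvW cs s

theorem pv_take_sub (d : List Char) (s h : Nat) :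
    pvCnt (d.take (s + h)) - pvCnt (d.take s) = pvCnt ((d.drop s).take h) := by
  rw [List.take_add]
  simp [pvCnt, List.count_append]

theorem pvW_succ (cs : List Char) (s : Nat) (hs : s < cs.length) :
    pvW cs (s + 1) = pvW cs s
      + (if (cs ++ cs).getD (cs.count 'H' + s) ' ' = 'H' then 1 else 0)
      - (if (cs ++ cs).getD s ' ' = 'H' then 1 else 0) := by
  have hle : cs.count 'H' ≤ cs.length := List.count_le_length
  rw [show cs.count 'H' + s = s + cs.count 'H' from Nat.add_comm _ _]
  have h1 : s + cs.count 'H' < (cs ++ cs).length := by simp; omega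
  have h2 : s < (cs ++ cs).length := by simp; omega
  have e1 : ((cs ++ cs).drop s).take (cs.count 'H' + 1)
      = ((cs ++ cs).drop s).take (cs.count 'H') ++ [(cs ++ cs).getD (s + cs.count 'H') ' '] := by
    rw [List.take_add_one, List.getElem?_drop, List.getD_eq_getElem _ _ h1,
      List.getElem?_eq_getElem h1]
    simp
  have e2 : ((cs ++ cs).drop s).take (cs.count 'H' + 1)
      = (cs ++ cs).getD s ' ' :: ((cs ++ cs).drop (s + 1)).take (cs.count 'H') := by
    rw [List.getD_eq_getElem _ _ h2, List.drop_eq_getElem_cons h2, List.take_succ_cons]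
  have hcnt := congrArg (List.count 'H') (e1.symm.trans e2)
  simp only [List.count_append, List.count_cons, List.count_nil] at hcnt
  unfold pvW pvCnt
  split_ifs with hA hB hB <;> simp only [hA, hB, beq_iff_eq, beq_self_eq_true, if_true, if_false] at hcnt <;> omega

-- A's main loop: circular sliding-window fold, with the running counter as invariant
theorem pvA_loop (cs : List Char) : ∀ (t s : Nat), s + t = cs.length → ∀ (ans : Int),
    (PySem.List.pyRange ((cs.count 'H' : Int) + s) ((cs.length : Int) + (cs.count 'H' : Int)) 1).foldl
      (fun st i =>
        let i1 : Int := if i > (cs.length : Int) - 1 then i - (cs.length : Int) else i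
        let i2 : Int := i - (cs.count 'H' : Int)
        let c1 : Int := if PySem.List.pyGetD cs i1 ' ' = 'H' then st.1 + 1 else st.1
        let c2 : Int := if PySem.List.pyGetD cs i2 ' ' = 'H' then c1 - 1 else c1
        (c2, min st.2 ((cs.count 'H' : Int) - c2)))
      (pvW cs s, ans)
    = (pvW cs cs.length, ((List.range t).map (fun k => pvF cs (s + k + 1))).foldl min ans) := by
  intro t
  induction t with
  | zero =>
      intro s hs ans
      rw [PySem.List.pyRange_one_eq_nil (by omega)]
      simp [show s = cs.length by omega]
  | succ t ih =>
      intro s hs ans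
      have hsn : s < cs.length := by omega
      have hle : cs.count 'H' ≤ cs.length := List.count_le_length
      rw [PySem.List.pyRange_one_cons (by omega)]
      rw [List.foldl_cons]
      -- the state after one step
      have hget1 : PySem.List.pyGetD cs
          (if (cs.count 'H' : Int) + s > (cs.length : Int) - 1 then (cs.count 'H' : Int) + s - (cs.length : Int) else (cs.count 'H' : Int) + s) ' '
          = (cs ++ cs).getD (cs.count 'H' + s) ' ' := by
        by_cases hc : cs.length ≤ cs.count 'H' + s
        · rw [if_pos (by omega)]
          have : (cs.count 'H' : Int) + s - (cs.length : Int) = ((cs.count 'H' + s - cs.length : Nat) : Int) := by omega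
          rw [this, PySem.List.pyGetD_natCast]
          rw [List.getD_eq_getElem _ _ (by omega), List.getD_eq_getElem _ _ (by simp; omega)]
          rw [List.getElem_append_right (by omega)]
        · rw [if_neg (by omega)]
          have : (cs.count 'H' : Int) + s = ((cs.count 'H' + s : Nat) : Int) := by push_cast; ring
          rw [this, PySem.List.pyGetD_natCast]
          rw [List.getD_eq_getElem _ _ (by omega), List.getD_eq_getElem _ _ (by simp; omega)]
          rw [List.getElem_append_left (by omega)]
      have hget2 : PySem.List.pyGetD cs ((cs.count 'H' : Int) + s - (cs.count 'H' : Int)) ' '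
          = (cs ++ cs).getD s ' ' := by
        have : (cs.count 'H' : Int) + s - (cs.count 'H' : Int) = ((s : Nat) : Int) := by ring
        rw [this, PySem.List.pyGetD_natCast]
        rw [List.getD_eq_getElem _ _ hsn, List.getD_eq_getElem _ _ (by simp; omega)]
        rw [List.getElem_append_left hsn]
      simp only [hget1, hget2]
      have hstep : (if (cs ++ cs).getD s ' ' = 'H'
            then (if (cs ++ cs).getD (cs.count 'H' + s) ' ' = 'H' then pvW cs s + 1 else pvW cs s) - 1
            else (if (cs ++ cs).getD (cs.count 'H' + s) ' ' = 'H' then pvW cs s + 1 else pvW cs s))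
          = pvW cs (s + 1) := by
        rw [pvW_succ cs s hsn]
        split_ifs <;> ring
      rw [hstep]
      have harg : (cs.count 'H' : Int) + s + 1 = (cs.count 'H' : Int) + ((s + 1 : Nat) : Int) := by push_cast; ring
      rw [harg, ih (s + 1) (by omega) (min ans ((cs.count 'H' : Int) - pvW cs (s + 1)))]
      have : (cs.count 'H' : Int) - pvW cs (s + 1) = pvF cs (s + 1) := by
        simp [pvF, pvCnt]
      rw [this]
      rw [List.range_succ_eq_map, List.map_cons, List.foldl_cons, List.map_map, Nat.add_zero]
      have he : List.map ((fun k => pvF cs (s + k + 1)) ∘ Nat.succ) (List.range t)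
          = List.map (fun k => pvF cs (s + 1 + k + 1)) (List.range t) := by
        apply List.map_congr_left
        intro a _
        simp only [Function.comp_apply, Nat.succ_eq_add_one]
        congr 1
        omega
      rw [he]

-- count of the first m characters, as A's index loop computes it
theorem pv_cnt_upto (cs : List Char) : ∀ (m : Nat), m ≤ cs.length →
    (List.range m).foldl (fun cur k => if cs.getD k ' ' = 'H' then cur + 1 else cur) (0 : Int)
      = pvCnt (cs.take m) := by
  intro m
  induction m with
  | zero => intro _; simp [pvCnt]
  | succ m ih =>
      intro hm
      rw [List.range_succ, List.foldl_append, List.foldl_cons, List.foldl_nil, ih (by omega)]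
      rw [List.take_add_one, List.getElem?_eq_getElem (by omega)]
      rw [List.getD_eq_getElem _ _ (by omega)]
      simp only [pvCnt, Option.toList_some, List.count_append, List.count_cons, List.count_nil,
        beq_iff_eq]
      split_ifs with h <;> push_cast <;> omega

theorem pv_portA_eq (S : String) :
    process S = ((List.range S.toList.length).map (fun k => pvF S.toList (k + 1))).foldl
      min (pvF S.toList 0) := by
  set cs := S.toList with hcs
  unfold process
  simp only [← hcs]
  have hle : cs.count 'H' ≤ cs.length := List.count_le_length
  -- the first loop is the H-count
  have hcount : cs.foldl (fun acc c => if c = 'H' then acc + 1 else acc) (0 : Int)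
      = (cs.count 'H' : Int) := by
    have := PySem.List.foldl_count_if (fun c => c == 'H') cs 0
    simp only [beq_iff_eq] at this
    rw [this, List.count]
    simp
  -- the second loop computes the H-count of the first h_count characters
  have hcur : (PySem.List.pyRange 0 (cs.count 'H' : Int) 1).foldl
      (fun cur i => if PySem.List.pyGetD cs i ' ' = 'H' then cur + 1 else cur) (0 : Int)
      = pvW cs 0 := by
    rw [PySem.List.pyRange_zero_natCast, List.foldl_map]
    simp only [PySem.List.pyGetD_natCast]
    rw [pv_cnt_upto cs (cs.count 'H') hle]
    unfold pvW
    rw [List.drop_zero, List.take_append_of_le_length hle]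
  simp only [hcount, hcur]
  have hloop := pvA_loop cs cs.length 0 (by omega) ((cs.count 'H' : Int) - pvW cs 0)
  simp only [Nat.cast_zero, add_zero, zero_add] at hloop
  rw [hloop]
  simp [pvF, pvCnt]

-- the prefix-sum list B builds over d is exactly [count of H in d.take k | k = 0..len d]
theorem pvPref_eq (d : List Char) :
    d.foldl (fun p c => p ++ [PySem.List.pyGetD p (-1) 0 + (if c = 'H' then 1 else 0)]) [0]
      = (List.range (d.length + 1)).map (fun k => pvCnt (d.take k)) := by
  induction d using List.reverseRecOn with
  | nil => simp [pvCnt]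
  | append_singleton d c ih =>
      rw [List.foldl_append, List.foldl_cons, List.foldl_nil, ih]
      rw [List.range_succ, List.map_append, List.map_singleton,
        PySem.List.pyGetD_neg_one_append_singleton]
      have hlen : (d ++ [c]).length = d.length + 1 := by simp
      rw [hlen, List.range_succ, List.map_append, List.range_succ, List.map_append]
      congr 1
      · congr 1
        · apply List.map_congr_left
          intro k hk
          rw [List.mem_range] at hk
          rw [List.take_append_of_le_length (by omega)]
        · simp only [List.map_singleton,
            List.take_append_of_le_length (le_refl d.length), List.take_length]
      · simp only [List.map_singleton]
        have ht : (d ++ [c]).take (d.length + 1) = d ++ [c] := List.take_of_length_le (by simp)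
        rw [ht, List.take_length]
        simp only [pvCnt, List.count_append, List.count_cons, List.count_nil, beq_iff_eq]
        split_ifs <;> push_cast <;> ring_nf

theorem pv_portB_eq (S : String) :
    process_alt S = ((List.range (S.toList.length - 1)).map (fun k => pvF S.toList (k + 1))).foldl
      min (pvF S.toList 0) := by
  set cs := S.toList with hcs
  have hle : cs.count 'H' ≤ cs.length := List.count_le_length
  unfold process_alt
  simp only [← hcs, pvPref_eq (cs ++ cs)]
  have hlen : (cs ++ cs).length = cs.length + cs.length := by simp
  set f : Nat → Int := fun k => pvCnt ((cs ++ cs).take k) with hf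
  have hidx : ∀ (k : Nat), k ≤ cs.length + cs.length →
      PySem.List.pyGetD ((List.range ((cs ++ cs).length + 1)).map f) ((k : Nat) : Int) 0 = f k := by
    intro k hk
    rw [PySem.List.pyGetD_natCast, PySem.List.getD_map_range f _ k 0 (by omega)]
  -- h = p[n] = count of H in cs
  have hh : PySem.List.pyGetD ((List.range ((cs ++ cs).length + 1)).map f) ((cs.length : Nat) : Int) 0
      = (cs.count 'H' : Int) := by
    rw [hidx cs.length (by omega), hf]
    simp [pvCnt]
  rw [hh]
  -- best = h - p[h] = pvF cs 0
  have hb : (cs.count 'H' : Int) - PySem.List.pyGetD ((List.range ((cs ++ cs).length + 1)).map f) ((cs.count 'H' : Int)) 0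
      = pvF cs 0 := by
    rw [show ((cs.count 'H' : Int)) = ((cs.count 'H' : Nat) : Int) by simp,
      hidx (cs.count 'H') (by omega)]
    simp [pvF, pvW, pvCnt, hf]
  rw [hb]
  rw [PySem.List.pyRange_one, List.foldl_map]
  have hnt : ((cs.length : Int) - 1).toNat = cs.length - 1 := by omega
  rw [hnt]
  rw [PySem.List.foldl_congr_mem _ _
      (fun best k => min best (pvF cs (k + 1))) _ ?_]
  · rw [← List.foldl_map]
  · intro acc k hk
    rw [List.mem_range] at hk
    have h1 : (1 : Int) + (k : Int) + (cs.count 'H' : Int) = ((k + 1 + cs.count 'H' : Nat) : Int) := by push_cast; ring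
    have h2 : (1 : Int) + (k : Int) = ((k + 1 : Nat) : Int) := by push_cast; ring
    rw [h1, h2, hidx (k + 1 + cs.count 'H') (by omega), hidx (k + 1) (by omega)]
    congr 1
    rw [hf]
    simp only [pvF, pvW]
    rw [← pv_take_sub (cs ++ cs) (k + 1) (cs.count 'H')]
    simp only [pvCnt]

theorem pv_last_eq_first (cs : List Char) : pvF cs cs.length = pvF cs 0 := by
  unfold pvF pvW
  rw [List.drop_left, List.drop_zero, List.take_append_of_le_length List.count_le_length]

-- ===== VERDICT (by name: the statement is the Claim_ definition above) =====
theorem process_spec : Claim_equal_process := by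
  intro S _
  unfold Spec_process
  rw [pv_portA_eq, pv_portB_eq]
  cases hn : S.toList.length with
  | zero => simp
  | succ m =>
      rw [Nat.add_sub_cancel, List.range_succ, List.map_append, List.foldl_append]
      simp only [List.map_singleton, List.foldl_cons, List.foldl_nil]
      have hlast : pvF S.toList (m + 1) = pvF S.toList 0 := by
        rw [← hn]; exact pv_last_eq_first S.toList
      rw [hlast]
      exact min_eq_left (PySem.List.foldl_min_le _ _).1
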